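-- pv_equiv track=rewrite | github.com/christinalau16/anomaly | src/generate/generatePPM.py | initializeCommunities
-- ===== SOURCE A (Python) =====
-- def initializeCommunities(n):
--     k = 5 #number of communities
--     k_n1 = 1000 #number of vertices in each community
--     k_n2 = 500
--     k_n3 = 250
--     k_n4 = 100
--     k_n5 = 50
--     c1 = [] #communities
--     c2 = []
--     c3 = []
--     c4 = []
--     c5 = []
--     communities = [c1, c2, c3, c4, c5]
--     z = []
--
--     for i in range(n):
--         if i in range(k_n1):
--             c1.append(i)
--             z.append(0)
--         elif i in range(k_n1, k_n1+k_n2):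
--             c2.append(i)
--             z.append(1)
--         elif i in range(k_n1+k_n2, k_n1+k_n2+k_n3):
--             c3.append(i)
--             z.append(2)
--         elif i in range(k_n1+k_n2+k_n3, k_n1+k_n2+k_n3+k_n4):
--             c4.append(i)
--             z.append(3)
--         else:
--             c5.append(i)
--             z.append(4)
--     return z
-- ===== SOURCE B (Python) =====
-- def initializeCommunities(n):
--     # cumulative community sizes; vertex i belongs to the number of thresholds it has passed
--     thresholds = (1000, 1500, 1750, 1850)
--     return [sum(t <= i for t in thresholds) for i in range(n)]
-- ===== Notes on version B (the rewrite author's own statement) =====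
-- stated objective: idiomatic
-- what changed: Replaces the chained if/elif over range-membership tests (and the five dead community lists) with a cumulative-threshold table: the band of vertex i is the count of thresholds i has passed, computed by a single comprehension.
import Mathlib
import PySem

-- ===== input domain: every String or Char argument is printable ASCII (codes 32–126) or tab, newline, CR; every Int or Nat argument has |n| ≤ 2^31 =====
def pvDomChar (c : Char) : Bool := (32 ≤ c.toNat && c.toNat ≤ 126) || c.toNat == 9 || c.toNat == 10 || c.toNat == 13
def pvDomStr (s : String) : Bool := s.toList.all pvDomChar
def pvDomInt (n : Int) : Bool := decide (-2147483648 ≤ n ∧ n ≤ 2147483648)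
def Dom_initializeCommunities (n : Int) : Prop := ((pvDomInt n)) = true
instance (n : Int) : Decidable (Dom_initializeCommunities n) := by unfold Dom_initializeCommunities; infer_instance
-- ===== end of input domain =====

-- B: threshold-count band assignment instead of chained range-membership if/elif; drops the dead community lists.
-- ===== PORT A =====
-- loop state: the five community lists c1..c5 and z, as in the Python
def pvStepA (st : List Int × List Int × List Int × List Int × List Int × List Int) (i : Int) :
    List Int × List Int × List Int × List Int × List Int × List Int :=
  let (c1, c2, c3, c4, c5, z) := st
  if 0 ≤ i ∧ i < 1000 then (c1 ++ [i], c2, c3, c4, c5, z ++ [0])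
  else if 1000 ≤ i ∧ i < 1500 then (c1, c2 ++ [i], c3, c4, c5, z ++ [1])
  else if 1500 ≤ i ∧ i < 1750 then (c1, c2, c3 ++ [i], c4, c5, z ++ [2])
  else if 1750 ≤ i ∧ i < 1850 then (c1, c2, c3, c4 ++ [i], c5, z ++ [3])
  else (c1, c2, c3, c4, c5 ++ [i], z ++ [4])

def initializeCommunities (n : Int) : List Int :=
  ((PySem.List.pyRange 0 n 1).foldl pvStepA ([], [], [], [], [], [])).2.2.2.2.2

-- ===== PORT B =====
def initializeCommunities_alt (n : Int) : List Int :=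
  (PySem.List.pyRange 0 n 1).map
    (fun i => ([1000, 1500, 1750, 1850] : List Int).foldl
      (fun s t => s + (if t ≤ i then 1 else 0)) 0)

-- ===== PRECONDITION & SPEC =====
def Spec_initializeCommunities (n : Int) (out : List Int) : Prop := out = initializeCommunities_alt n
instance (n : Int) (out : List Int) : Decidable (Spec_initializeCommunities n out) := by unfold Spec_initializeCommunities; infer_instance

-- ===== CLAIM (what is proved, stated in full; the proofs are below) =====
def Claim_equal_initializeCommunities : Prop := ∀ (n : Int), Dom_initializeCommunities n → Spec_initializeCommunities n (initializeCommunities n)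

-- ===== LEMMAS AND PROOFS =====

-- ===== VERDICT (by name: the statement is the Claim_ definition above) =====
-- A's whole loop appends z ++ map band, for any starting state, provided every i is nonnegative
theorem pvFoldA_z (l : List Int) (hl : ∀ i ∈ l, 0 ≤ i)
    (c1 c2 c3 c4 c5 z : List Int) :
    (l.foldl pvStepA (c1, c2, c3, c4, c5, z)).2.2.2.2.2 =
      z ++ l.map (fun i => ([1000, 1500, 1750, 1850] : List Int).foldl
        (fun s t => s + (if t ≤ i then 1 else 0)) 0) := by
  induction l generalizing c1 c2 c3 c4 c5 z with
  | nil => simp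
  | cons a l ih =>
    have ha : 0 ≤ a := hl a (List.mem_cons_self ..)
    have hl' : ∀ i ∈ l, 0 ≤ i := fun i hi => hl i (List.mem_cons_of_mem _ hi)
    simp only [List.foldl_cons, List.map_cons, pvStepA]
    split_ifs with h1 h2 h3 h4 <;>
        rw [ih hl'] <;>
        simp only [List.append_assoc, List.singleton_append, List.append_right_inj,
          List.cons.injEq, List.foldl_cons, List.foldl_nil, and_true] <;>
        first | (split_ifs <;> omega) | omega

theorem initializeCommunities_spec : Claim_equal_initializeCommunities := by
  intro n _
  unfold Spec_initializeCommunities initializeCommunities initializeCommunities_alt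
  rw [pvFoldA_z]
  · simp
  · intro i hi
    exact (PySem.List.mem_pyRange_one.mp hi).1
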